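-- pv_equiv track=rewrite | github.com/zebra0345/algorithm | 프로그래머스/3/68646. 풍선 터트리기/풍선 터트리기.py | solution
-- ===== SOURCE A (Python) =====
-- def solution(a):
--     if len(a) <= 2:
--         return len(a)
--
--     answer = 0
--     n = len(a)
--
--     left_min = [0] * n
--     left_min[0] = a[0]
--
--     for i in range(1, n):
--         left_min[i] = min(left_min[i-1], a[i])
--
--     right_min = [0] * n
--     right_min[-1] = a[-1]
--
--     for i in range(n-2, -1, -1):
--         right_min[i] = min(right_min[i+1], a[i])
--
--     for i in range(n):
--         if i == 0 or i == n-1: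
--             answer += 1
--             continue
--
--         if a[i] > left_min[i-1] and a[i] > right_min[i+1]:
--             continue
--
--         answer += 1
--
--     return answer
-- ===== SOURCE B (Python) =====
-- def solution(a):
--     n = len(a)
--     order = sorted(range(n), key=lambda i: a[i])
--     popped = 0
--     lo = n      # min index among strictly smaller values (n = none yet)
--     hi = -1     # max index among strictly smaller values (-1 = none yet)
--     k = 0
--     while k < n:
--         j = k
--         while j < n and a[order[j]] == a[order[k]]:
--             j += 1
--         for i in order[k:j]:
--             if not (lo < i < hi):
--                 popped += 1
--         for i in order[k:j]:
--             lo = min(lo, i)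
--             hi = max(hi, i)
--         k = j
--     return popped
-- ===== Notes on version B (the rewrite author's own statement) =====
-- stated objective: alternative
-- what changed: Replaces A's three linear passes over preallocated prefix-min and suffix-min arrays by a sort-and-sweep: indices are sorted by balloon value and processed in groups of equal value while maintaining the min/max index span (lo,hi) of strictly smaller values; an index is counted unless it lies strictly inside that span.
import Mathlib
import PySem

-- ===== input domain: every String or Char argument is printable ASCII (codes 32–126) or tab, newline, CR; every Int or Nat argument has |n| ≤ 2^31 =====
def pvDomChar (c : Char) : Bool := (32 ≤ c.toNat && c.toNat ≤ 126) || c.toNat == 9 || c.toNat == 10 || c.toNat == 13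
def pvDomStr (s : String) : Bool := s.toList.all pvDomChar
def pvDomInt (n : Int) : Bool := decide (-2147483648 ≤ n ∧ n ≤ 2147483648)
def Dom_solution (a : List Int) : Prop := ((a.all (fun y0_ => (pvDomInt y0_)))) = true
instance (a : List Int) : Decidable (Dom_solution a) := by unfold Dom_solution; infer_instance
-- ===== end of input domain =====

-- B replaces A's three prefix/suffix-min array passes by a different algorithm: sort the
-- indices by balloon value and sweep the groups of equal value in increasing order,
-- maintaining the index span (lo,hi) of strictly smaller values (objective: alternative).

-- ===== PORT A =====
-- loop bodies of A's three for-loops, as helpers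
def lstep (a lm : List Int) (i : Int) : List Int :=
  PySem.List.pySetD lm i (min (PySem.List.pyGetD lm (i - 1) 0) (PySem.List.pyGetD a i 0))

def rstep (a rm : List Int) (i : Int) : List Int :=
  PySem.List.pySetD rm i (min (PySem.List.pyGetD rm (i + 1) 0) (PySem.List.pyGetD a i 0))

def cstep (a : List Int) (n : Int) (lm rm : List Int) (answer : Int) (i : Int) : Int :=
  if i = 0 ∨ i = n - 1 then answer + 1
  else if PySem.List.pyGetD a i 0 > PySem.List.pyGetD lm (i - 1) 0 ∧
          PySem.List.pyGetD a i 0 > PySem.List.pyGetD rm (i + 1) 0 then answer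
  else answer + 1

-- literal port of A; Python's `right_min[-1] = a[-1]` is pySetD/pyGetD at index -1 (exact)
def solution (a : List Int) : Int :=
  if a.length ≤ 2 then (a.length : Int) else
  let n : Int := (a.length : Int)
  let left_min0 : List Int := PySem.List.pySetD (List.replicate a.length (0 : Int)) 0 (PySem.List.pyGetD a 0 0)
  let left_min : List Int := (PySem.List.pyRange 1 n 1).foldl (lstep a) left_min0
  let right_min0 : List Int := PySem.List.pySetD (List.replicate a.length (0 : Int)) (-1) (PySem.List.pyGetD a (-1) 0)
  let right_min : List Int := (PySem.List.pyRange (n - 2) (-1) (-1)).foldl (rstep a) right_min0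
  (PySem.List.pyRange 0 n 1).foldl (cstep a n left_min right_min) 0

-- ===== PORT B =====
-- Source B's while-loop over the sorted index list: each step takes one group of equal-valued
-- indices (the inner `while j < n and a[order[j]] == a[order[k]]` plus the slice order[k:j]),
-- counts its members outside the open span (lo,hi), then widens lo/hi with the group.
def bLoop (a : List Int) : List Int → Int → Int → Int → Int
  | [], _, _, popped => popped
  | i :: rest, lo, hi, popped =>
    let v := PySem.List.pyGetD a i 0
    let grp := (i :: rest).takeWhile (fun j => PySem.List.pyGetD a j 0 == v)
    let rest' := (i :: rest).dropWhile (fun j => PySem.List.pyGetD a j 0 == v)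
    bLoop a rest'
      (grp.foldl min lo) (grp.foldl max hi)
      (popped + ((grp.filter (fun x => !(decide (lo < x) && decide (x < hi)))).length : Int))
termination_by s => s.length
decreasing_by
  simp only [List.dropWhile_cons, beq_self_eq_true, if_pos]
  exact Nat.lt_succ_of_le (List.length_dropWhile_le _ _)

def solution_alt (a : List Int) : Int :=
  let n : Int := (a.length : Int)
  let order : List Int := PySem.List.sorted (PySem.List.pyRange 0 n 1) (fun i => PySem.List.pyGetD a i 0)
  bLoop a order n (-1) 0

-- ===== PRECONDITION & SPEC =====
def Spec_solution (a : List Int) (out : Int) : Prop := out = solution_alt a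
instance (a : List Int) (out : Int) : Decidable (Spec_solution a out) := by unfold Spec_solution; infer_instance

-- ===== CLAIM (what is proved, stated in full; the proofs are below) =====
def Claim_equal_solution : Prop := ∀ (a : List Int), Dom_solution a → Spec_solution a (solution a)

-- ===== LEMMAS AND PROOFS =====

-- running minimum as an optional accumulator
def omin : Option Int → Int → Int
  | none, x => x
  | some m, x => min m x

def ole : Option Int → Int → Bool
  | none, _ => true
  | some m, x => decide (x ≤ m)

def mfold : Option Int → List Int → Option Int
  | m?, [] => m?
  | m?, x :: t => mfold (some (omin m? x)) t

-- prefix/suffix minima including position i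
def pmin (a : List Int) (i : Nat) : Int := omin (mfold none (a.take i)) (a.getD i 0)
def smin (a : List Int) (i : Nat) : Int := omin (mfold none (a.drop (i + 1))) (a.getD i 0)

-- the common characterization both ports are reduced to: i is counted iff a[i] is a
-- prefix minimum or a suffix minimum
def cnt (a : List Int) (i : Nat) : Bool :=
  ole (mfold none (a.take i)) (a.getD i 0) || ole (mfold none (a.drop (i + 1))) (a.getD i 0)

theorem mfold_push (t : List Int) : ∀ (m? : Option Int) (x : Int),
    mfold (some (omin m? x)) t = some (omin (mfold m? t) x) := by
  induction t with
  | nil => intro m? x; simp [mfold]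
  | cons y t ih =>
    intro m? x
    simp only [mfold]
    rw [← ih (some (omin m? y)) x]
    congr 2
    cases m? <;> simp [omin, min_comm, min_left_comm]

theorem mfold_append (l : List Int) (x : Int) (m? : Option Int) :
    mfold m? (l ++ [x]) = some (omin (mfold m? l) x) := by
  induction l generalizing m? with
  | nil => simp [mfold]
  | cons y t ih => simp only [List.cons_append, mfold]; exact ih _

theorem mfold_take (a : List Int) (i : Nat) (h : i < a.length) :
    mfold none (a.take (i + 1)) = some (pmin a i) := by
  have hg : a.getD i 0 = a[i] := by
    simp [List.getD_eq_getElem?_getD, List.getElem?_eq_getElem h]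
  rw [List.take_add_one, List.getElem?_eq_getElem h]
  simp only [Option.toList_some, mfold_append, pmin, hg]

theorem mfold_drop (a : List Int) (i : Nat) (h : i < a.length) :
    mfold none (a.drop i) = some (smin a i) := by
  have hg : a.getD i 0 = a[i] := by
    simp [List.getD_eq_getElem?_getD, List.getElem?_eq_getElem h]
  rw [List.drop_eq_getElem_cons h]
  show mfold (some (omin none a[i])) (a.drop (i + 1)) = _
  rw [mfold_push, smin, hg]

theorem pmin_succ (a : List Int) (k : Nat) (h1 : 1 ≤ k) (h : k < a.length) :
    pmin a k = min (pmin a (k - 1)) (a.getD k 0) := by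
  unfold pmin
  rw [show k = (k - 1) + 1 by omega] at h ⊢
  rw [mfold_take a (k - 1) (by omega)]
  rfl

theorem smin_succ (a : List Int) (k : Nat) (h : k + 1 < a.length) :
    smin a k = min (smin a (k + 1)) (a.getD k 0) := by
  unfold smin
  rw [mfold_drop a (k + 1) h]
  rfl

theorem RM_getD (a : List Int) (k : Nat) (h : k < a.length) :
    ((List.range a.length).map (smin a)).getD k 0 = smin a k :=
  PySem.List.getD_map_range _ _ _ _ h

theorem RM_getElem (a : List Int) (k : Nat) (h : k < a.length) :
    ((List.range a.length).map (smin a))[k]'(by simp [h]) = smin a k := by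
  rw [List.getElem_map, List.getElem_range]

theorem smin_last (a : List Int) (h : 1 ≤ a.length) :
    smin a (a.length - 1) = a.getD (a.length - 1) 0 := by
  unfold smin
  rw [show a.length - 1 + 1 = a.length by omega, List.drop_length]
  rfl

theorem LM_getD (a : List Int) (k : Nat) (h : k < a.length) :
    ((List.range a.length).map (pmin a)).getD k 0 = pmin a k :=
  PySem.List.getD_map_range _ _ _ _ h

theorem A_left_inv (a : List Int) (k : Nat) (h1 : 1 ≤ k) (h2 : k ≤ a.length) :
    (PySem.List.pyRange 1 (k : Int) 1).foldl (lstep a)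
      (PySem.List.pySetD (List.replicate a.length (0 : Int)) 0 (PySem.List.pyGetD a 0 0)) =
    ((List.range a.length).map (pmin a)).take k ++ List.replicate (a.length - k) 0 := by
  induction k, h1 using Nat.le_induction with
  | base =>
    rw [show ((1 : Nat) : Int) = 1 by norm_num, PySem.List.pyRange_one_eq_nil le_rfl]
    simp only [List.foldl_nil]
    rw [PySem.List.pySetD_of_nonneg _ _ le_rfl, PySem.List.pyGetD_zero]
    obtain ⟨m, hm⟩ : ∃ m, a.length = m + 1 := ⟨a.length - 1, by omega⟩
    rw [hm, List.replicate_succ, List.range_succ_eq_map, List.map_cons, List.take_succ_cons,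
        List.take_zero]
    simp [pmin, mfold, omin]
  | succ k hk ih =>
    have hkn : k < a.length := by omega
    rw [show ((k + 1 : Nat) : Int) = (k : Int) + 1 by push_cast; ring,
        PySem.List.pyRange_one_succ_right (by exact_mod_cast Nat.one_le_cast.mpr hk),
        List.foldl_append, ih (by omega), List.foldl_cons, List.foldl_nil]
    unfold lstep
    have hc1 : (k : Int) - 1 = ((k - 1 : Nat) : Int) := by omega
    have hlen : (((List.range a.length).map (pmin a)).take k).length = k := by
      simp; omega
    have hget1 : PySem.List.pyGetD (((List.range a.length).map (pmin a)).take k ++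
        List.replicate (a.length - k) 0) ((k : Int) - 1) 0 = pmin a (k - 1) := by
      rw [hc1, PySem.List.pyGetD_natCast, List.getD_append _ _ _ _ (by omega),
          List.getD_eq_getElem?_getD, List.getElem?_take_of_lt (by omega),
          ← List.getD_eq_getElem?_getD, LM_getD a (k - 1) (by omega)]
    have hget2 : PySem.List.pyGetD a ((k : Nat) : Int) 0 = a.getD k 0 :=
      PySem.List.pyGetD_natCast a k 0
    rw [hget1, hget2, ← pmin_succ a k hk hkn,
        PySem.List.pySetD_of_nonneg _ _ (by positivity), Int.toNat_natCast]
    rw [List.set_append, if_neg (by omega)]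
    rw [hlen, Nat.sub_self, show a.length - k = (a.length - (k + 1)) + 1 by omega,
        List.replicate_succ, List.set_cons_zero]
    rw [List.take_add_one, List.getElem?_eq_getElem (by simp; omega),
        List.getElem_map, List.getElem_range]
    simp

theorem A_left (a : List Int) (h : 1 ≤ a.length) :
    (PySem.List.pyRange 1 ((a.length : Int)) 1).foldl (lstep a)
      (PySem.List.pySetD (List.replicate a.length (0 : Int)) 0 (PySem.List.pyGetD a 0 0)) =
    (List.range a.length).map (pmin a) := by
  rw [A_left_inv a a.length h le_rfl, Nat.sub_self, List.replicate_zero, List.append_nil,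
      List.take_of_length_le (by simp)]

theorem A_right_inv (a : List Int) (m : Nat) (h2 : m + 1 ≤ a.length) :
    (PySem.List.pyRange ((m : Int) - 1) (-1) (-1)).foldl (rstep a)
      (List.replicate m 0 ++ ((List.range a.length).map (smin a)).drop m) =
    (List.range a.length).map (smin a) := by
  induction m with
  | zero =>
    rw [show ((0 : Nat) : Int) - 1 = -1 by norm_num, PySem.List.pyRange_neg_one_eq_nil le_rfl]
    simp
  | succ m ih =>
    rw [show ((m + 1 : Nat) : Int) - 1 = (m : Int) by push_cast; ring,
        PySem.List.pyRange_neg_one_cons (by omega), List.foldl_cons]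
    have hstate : rstep a (List.replicate (m + 1) 0 ++ ((List.range a.length).map (smin a)).drop (m + 1)) (m : Int) =
        List.replicate m 0 ++ ((List.range a.length).map (smin a)).drop m := by
      unfold rstep
      have hmn' : m + 1 < a.length := by omega
      have hget1 : PySem.List.pyGetD (List.replicate (m + 1) 0 ++ ((List.range a.length).map (smin a)).drop (m + 1)) ((m : Int) + 1) 0 = smin a (m + 1) := by
        rw [show (m : Int) + 1 = ((m + 1 : Nat) : Int) by push_cast; ring,
            PySem.List.pyGetD_natCast,
            List.getD_append_right _ _ _ _ (by simp),
            List.length_replicate, Nat.sub_self, List.getD_eq_getElem?_getD,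
            List.getElem?_drop, Nat.add_zero, ← List.getD_eq_getElem?_getD,
            RM_getD a (m + 1) hmn']
      rw [hget1, PySem.List.pyGetD_natCast, ← smin_succ a m hmn',
          PySem.List.pySetD_of_nonneg _ _ (by positivity), Int.toNat_natCast]
      rw [List.set_append, if_pos (by simp), List.replicate_succ',
          List.set_append, if_neg (by simp), List.length_replicate, Nat.sub_self,
          List.set_cons_zero]
      rw [List.drop_eq_getElem_cons (by simp; omega : m < ((List.range a.length).map (smin a)).length),
          RM_getElem a m (by omega)]
      simp
    rw [hstate, ih (by omega)]

theorem A_right (a : List Int) (h : 1 ≤ a.length) :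
    (PySem.List.pyRange ((a.length : Int) - 2) (-1) (-1)).foldl (rstep a)
      (PySem.List.pySetD (List.replicate a.length (0 : Int)) (-1) (PySem.List.pyGetD a (-1) 0)) =
    (List.range a.length).map (smin a) := by
  have hsetD : PySem.List.pySetD (List.replicate a.length (0 : Int)) (-1) (PySem.List.pyGetD a (-1) 0) =
      List.replicate (a.length - 1) 0 ++ ((List.range a.length).map (smin a)).drop (a.length - 1) := by
    have hidx : PySem.List.pyIdx? a.length (-1) = some (a.length - 1) := by
      simp only [PySem.List.pyIdx?]
      rw [if_neg (by omega), if_pos (by omega)]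
      congr 1
    rw [show PySem.List.pySetD (List.replicate a.length (0 : Int)) (-1) (PySem.List.pyGetD a (-1) 0) =
          (List.replicate a.length (0 : Int)).set (a.length - 1) (PySem.List.pyGetD a (-1) 0) by
        simp [PySem.List.pySetD, PySem.List.pySet?, hidx]]
    have hne : a ≠ [] := by intro hnil; rw [hnil] at h; simp at h
    rw [PySem.List.pyGetD_neg_one a 0 hne]
    rw [List.drop_eq_getElem_cons (by simp; omega : a.length - 1 < ((List.range a.length).map (smin a)).length),
        RM_getElem a (a.length - 1) (by omega), smin_last a h]
    have hdrop : ((List.range a.length).map (smin a)).drop (a.length - 1 + 1) = [] := by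
      apply List.drop_eq_nil_of_le
      simp
      omega
    rw [hdrop]
    conv_lhs => rw [show a.length = (a.length - 1) + 1 by omega, List.replicate_succ',
                    List.set_append, if_neg (by simp)]
    rw [List.length_replicate, show a.length - 1 + 1 - 1 - (a.length - 1) = 0 by omega,
        List.set_cons_zero]
    congr 2
    rw [List.getLast_eq_getElem, List.getD_eq_getElem?_getD,
        List.getElem?_eq_getElem (by omega), Option.getD_some]
  rw [hsetD, show (a.length : Int) - 2 = ((a.length - 1 : Nat) : Int) - 1 by omega,
      A_right_inv a (a.length - 1) (by omega)]

-- A equals the sum of the counted-indicators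
theorem A_eq_cnt (a : List Int) :
    solution a = ((List.range a.length).map (fun i => if cnt a i then (1 : Int) else 0)).sum := by
  unfold cnt
  unfold solution
  by_cases hn : a.length ≤ 2
  · rw [if_pos hn]
    have hone : ∀ i ∈ List.range a.length,
        (if ole (mfold none (a.take i)) (a.getD i 0) || ole (mfold none (a.drop (i + 1))) (a.getD i 0)
         then (1 : Int) else 0) = 1 := by
      intro i hi
      rw [List.mem_range] at hi
      rcases Nat.lt_or_ge i 1 with h0 | h0
      · have hz : i = 0 := by omega
        subst hz
        simp [ole, mfold]
      · have hl : i + 1 = a.length := by omega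
        have hd : a.drop (i + 1) = [] := by rw [hl, List.drop_length]
        simp [hd, mfold, ole]
    rw [List.map_congr_left hone]
    simp
  · rw [if_neg hn]
    have h3 : 3 ≤ a.length := by omega
    dsimp only
    rw [A_left a (by omega), A_right a (by omega)]
    have hbody : cstep a (a.length : Int) ((List.range a.length).map (pmin a)) ((List.range a.length).map (smin a)) =
        fun (answer : Int) (i : Int) => answer +
          (if i = 0 ∨ i = (a.length : Int) - 1 then 1
           else if PySem.List.pyGetD a i 0 > PySem.List.pyGetD ((List.range a.length).map (pmin a)) (i - 1) 0 ∧
                   PySem.List.pyGetD a i 0 > PySem.List.pyGetD ((List.range a.length).map (smin a)) (i + 1) 0 then 0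
           else 1) := by
      funext answer i
      unfold cstep
      split_ifs <;> omega
    rw [hbody, PySem.List.foldl_add, zero_add, PySem.List.pyRange_zero_nat, List.map_map]
    apply congrArg
    apply List.map_congr_left
    intro i hi
    rw [List.mem_range] at hi
    simp only [Function.comp]
    by_cases hi0 : i = 0
    · subst hi0
      rw [if_pos (Or.inl (by norm_num))]
      simp [ole, mfold]
    by_cases hil : i = a.length - 1
    · have hc : (i : Int) = (a.length : Int) - 1 := by omega
      rw [if_pos (Or.inr hc)]
      have hd : a.drop (i + 1) = [] := by
        rw [show i + 1 = a.length by omega, List.drop_length]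
      simp [hd, mfold, ole]
    · have h1 : 1 ≤ i := by omega
      have h2 : i + 1 < a.length := by omega
      rw [if_neg (by omega)]
      rw [PySem.List.pyGetD_natCast a i 0]
      rw [show (i : Int) - 1 = ((i - 1 : Nat) : Int) by omega, PySem.List.pyGetD_natCast,
          LM_getD a (i - 1) (by omega)]
      rw [show (i : Int) + 1 = ((i + 1 : Nat) : Int) by push_cast; ring, PySem.List.pyGetD_natCast,
          RM_getD a (i + 1) (by omega)]
      have hT := mfold_take a (i - 1) (by omega)
      rw [show i - 1 + 1 = i by omega] at hT
      have hD := mfold_drop a (i + 1) (by omega)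
      rw [hT, hD]
      unfold ole
      by_cases hp : a.getD i 0 ≤ pmin a (i - 1)
      · rw [if_neg (by omega), if_pos (by simp only [decide_eq_true hp, Bool.true_or])]
      · by_cases hs : a.getD i 0 ≤ smin a (i + 1)
        · rw [if_neg (by omega), if_pos (by simp only [decide_eq_true hs, Bool.or_true])]
        · rw [if_pos ⟨by omega, by omega⟩,
              if_neg (by simp only [decide_eq_false hp, decide_eq_false hs, Bool.or_self];
                         exact Bool.false_ne_true)]

-- ===== B-side lemmas =====

-- the counted condition on Int indices, as B's sweep decides it
def Cb (a : List Int) (x : Int) : Bool :=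
  !(decide (∃ j ∈ PySem.List.pyRange 0 (a.length : Int) 1, j < x ∧ PySem.List.pyGetD a j 0 < PySem.List.pyGetD a x 0) &&
    decide (∃ j ∈ PySem.List.pyRange 0 (a.length : Int) 1, x < j ∧ PySem.List.pyGetD a j 0 < PySem.List.pyGetD a x 0))

theorem foldl_min_lt (l : List Int) : ∀ (c x : Int),
    (l.foldl min c < x) ↔ (c < x ∨ ∃ j ∈ l, j < x) := by
  induction l with
  | nil => intro c x; simp
  | cons y t ih =>
    intro c x
    rw [List.foldl_cons, ih]
    constructor
    · rintro (h | ⟨j, hj, hjx⟩)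
      · rcases lt_or_ge c x with h' | h'
        · exact Or.inl h'
        · exact Or.inr ⟨y, List.mem_cons_self, by simp [min_def] at h; omega⟩
      · exact Or.inr ⟨j, List.mem_cons_of_mem _ hj, hjx⟩
    · rintro (h | ⟨j, hj, hjx⟩)
      · exact Or.inl (by simp [min_def]; omega)
      · rcases List.mem_cons.mp hj with rfl | hj'
        · exact Or.inl (by simp [min_def]; omega)
        · exact Or.inr ⟨j, hj', hjx⟩

theorem foldl_max_gt (l : List Int) : ∀ (c x : Int),
    (x < l.foldl max c) ↔ (x < c ∨ ∃ j ∈ l, x < j) := by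
  induction l with
  | nil => intro c x; simp
  | cons y t ih =>
    intro c x
    rw [List.foldl_cons, ih]
    constructor
    · rintro (h | ⟨j, hj, hjx⟩)
      · rcases lt_or_ge x c with h' | h'
        · exact Or.inl h'
        · exact Or.inr ⟨y, List.mem_cons_self, by simp [max_def] at h; omega⟩
      · exact Or.inr ⟨j, List.mem_cons_of_mem _ hj, hjx⟩
    · rintro (h | ⟨j, hj, hjx⟩)
      · exact Or.inl (by simp [max_def]; omega)
      · rcases List.mem_cons.mp hj with rfl | hj'
        · exact Or.inl (by simp [max_def]; omega)
        · exact Or.inr ⟨j, hj', hjx⟩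

theorem ole_mfold_any (l : List Int) : ∀ (m? : Option Int) (x : Int),
    ole (mfold m? l) x = (ole m? x && !(l.any (fun y => decide (y < x)))) := by
  induction l with
  | nil => intro m? x; simp [mfold]
  | cons y t ih =>
    intro m? x
    rw [show mfold m? (y :: t) = mfold (some (omin m? y)) t from rfl, ih]
    cases m? with
    | none =>
      simp only [ole, omin, List.any_cons, Bool.not_or, Bool.true_and]
      by_cases h : y < x
      · simp [h, show ¬ x ≤ y by omega]
      · simp [h, show x ≤ y by omega]
    | some m =>
      simp only [ole, omin, List.any_cons, Bool.not_or, le_min_iff]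
      by_cases h1 : x ≤ m
      · by_cases h2 : x ≤ y
        · simp [h1, h2, show ¬ y < x by omega]
        · simp [h1, h2, show y < x by omega]
      · simp [h1]

theorem dropWhile_head_false {α : Type} (p : α → Bool) :
    ∀ (l : List α) (x : α) (t : List α), l.dropWhile p = x :: t → p x = false := by
  intro l
  induction l with
  | nil => intro x t h; simp [List.dropWhile] at h
  | cons y l ih =>
    intro x t h
    rw [List.dropWhile_cons] at h
    by_cases hy : p y = true
    · rw [if_pos hy] at h; exact ih x t h
    · rw [if_neg hy] at h
      cases h; simpa using hy

theorem mem_pyRange_zero (n : Nat) (x : Int) :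
    x ∈ PySem.List.pyRange 0 (n : Int) 1 ↔ 0 ≤ x ∧ x < (n : Int) := by
  rw [PySem.List.pyRange_zero_nat]
  constructor
  · intro h
    obtain ⟨k, hk, rfl⟩ := List.mem_map.mp h
    rw [List.mem_range] at hk
    constructor <;> omega
  · rintro ⟨h0, hn⟩
    exact List.mem_map.mpr ⟨x.toNat, List.mem_range.mpr (by omega), by omega⟩

-- bridge: Cb at a cast index is the cnt indicator
theorem Cb_cast (a : List Int) (i : Nat) (h : i < a.length) :
    Cb a (i : Int) = cnt a i := by
  have hgi : PySem.List.pyGetD a (i : Int) 0 = a.getD i 0 := PySem.List.pyGetD_natCast a i 0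
  have hgetD : ∀ (k : Nat) (hk : k < a.length), a.getD k 0 = a[k]'hk := by
    intro k hk
    simp [List.getD_eq_getElem?_getD, List.getElem?_eq_getElem hk]
  have hL : (decide (∃ j ∈ PySem.List.pyRange 0 (a.length : Int) 1, j < (i : Int) ∧
        PySem.List.pyGetD a j 0 < PySem.List.pyGetD a (i : Int) 0)) =
      (a.take i).any (fun y => decide (y < a.getD i 0)) := by
    rw [Bool.eq_iff_iff, decide_eq_true_iff, List.any_eq_true]
    constructor
    · rintro ⟨j, hjr, hji, hlt⟩
      obtain ⟨h0, hn⟩ := (mem_pyRange_zero a.length j).mp hjr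
      have hjlen : j.toNat < a.length := by omega
      have hgj : PySem.List.pyGetD a j 0 = a.getD j.toNat 0 := by
        rw [← show ((j.toNat : Nat) : Int) = j by omega]
        exact PySem.List.pyGetD_natCast a j.toNat 0
      rw [hgj, hgi] at hlt
      refine ⟨a.getD j.toNat 0, ?_, decide_eq_true hlt⟩
      rw [hgetD j.toNat hjlen]
      exact List.mem_take_iff_getElem.mpr ⟨j.toNat, by omega, rfl⟩
    · rintro ⟨y, hy, hlt⟩
      obtain ⟨k, hk, rfl⟩ := List.mem_take_iff_getElem.mp hy
      have hki : k < i := by omega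
      have hkn : k < a.length := by omega
      refine ⟨(k : Int), (mem_pyRange_zero a.length (k : Int)).mpr ⟨by omega, by omega⟩, by omega, ?_⟩
      rw [PySem.List.pyGetD_natCast a k 0, hgi, hgetD k hkn]
      exact of_decide_eq_true hlt
  have hR : (decide (∃ j ∈ PySem.List.pyRange 0 (a.length : Int) 1, (i : Int) < j ∧
        PySem.List.pyGetD a j 0 < PySem.List.pyGetD a (i : Int) 0)) =
      (a.drop (i + 1)).any (fun y => decide (y < a.getD i 0)) := by
    rw [Bool.eq_iff_iff, decide_eq_true_iff, List.any_eq_true]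
    constructor
    · rintro ⟨j, hjr, hji, hlt⟩
      obtain ⟨h0, hn⟩ := (mem_pyRange_zero a.length j).mp hjr
      have hjlen : j.toNat < a.length := by omega
      have hgj : PySem.List.pyGetD a j 0 = a.getD j.toNat 0 := by
        rw [← show ((j.toNat : Nat) : Int) = j by omega]
        exact PySem.List.pyGetD_natCast a j.toNat 0
      rw [hgj, hgi] at hlt
      refine ⟨a.getD j.toNat 0, ?_, decide_eq_true hlt⟩
      rw [hgetD j.toNat hjlen]
      exact List.mem_drop_iff_getElem.mpr ⟨j.toNat - (i + 1), by omega, by congr 1; omega⟩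
    · rintro ⟨y, hy, hlt⟩
      obtain ⟨k, hk, rfl⟩ := List.mem_drop_iff_getElem.mp hy
      have hkn : i + 1 + k < a.length := by omega
      refine ⟨((i + 1 + k : Nat) : Int),
        (mem_pyRange_zero a.length _).mpr ⟨by omega, by omega⟩, by omega, ?_⟩
      rw [PySem.List.pyGetD_natCast a (i + 1 + k) 0, hgi, hgetD (i + 1 + k) hkn]
      exact of_decide_eq_true hlt
  unfold Cb cnt
  rw [hL, hR, ole_mfold_any, ole_mfold_any]
  simp [ole, Bool.not_and]

theorem pairwise_dropWhile_gt (key : Int → Int) (v : Int) (l : List Int)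
    (hpw : List.Pairwise (fun u w => key u ≤ key w) l)
    (hge : ∀ x ∈ l, v ≤ key x) :
    ∀ x ∈ l.dropWhile (fun j => key j == v), v < key x := by
  cases hd : l.dropWhile (fun j => key j == v) with
  | nil => intro x hx; cases hx
  | cons h' t' =>
    have hh' : (fun j => key j == v) h' = false := dropWhile_head_false _ l h' t' hd
    have hsub : List.Sublist (h' :: t') l := hd ▸ List.dropWhile_sublist _
    have hne : key h' ≠ v := by simpa [beq_iff_eq] using hh'
    have hh'gt : v < key h' := by
      have := hge h' (hsub.subset List.mem_cons_self)
      omega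
    have hpw' := hpw.sublist hsub
    intro x hx
    rcases List.mem_cons.mp hx with rfl | hx'
    · exact hh'gt
    · have := (List.pairwise_cons.mp hpw').1 x hx'
      omega

theorem bLoop_nil (a : List Int) (lo hi popped : Int) :
    bLoop a [] lo hi popped = popped := by
  rw [bLoop]

theorem bLoop_cons (a : List Int) (i : Int) (rest : List Int) (lo hi popped : Int) :
    bLoop a (i :: rest) lo hi popped =
      bLoop a ((i :: rest).dropWhile (fun j => PySem.List.pyGetD a j 0 == PySem.List.pyGetD a i 0))
        (((i :: rest).takeWhile (fun j => PySem.List.pyGetD a j 0 == PySem.List.pyGetD a i 0)).foldl min lo)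
        (((i :: rest).takeWhile (fun j => PySem.List.pyGetD a j 0 == PySem.List.pyGetD a i 0)).foldl max hi)
        (popped + ((((i :: rest).takeWhile (fun j => PySem.List.pyGetD a j 0 == PySem.List.pyGetD a i 0)).filter
          (fun x => !(decide (lo < x) && decide (x < hi)))).length : Int)) := by
  rw [bLoop]

-- the sweep invariant: with p the already-processed indices (exactly those of strictly
-- smaller value), bLoop counts the Cb-indices of the remaining sorted list s
theorem bLoop_inv (a : List Int) : ∀ (N : Nat) (s : List Int), s.length ≤ N → ∀ (p : List Int),
    (p ++ s).Perm (PySem.List.pyRange 0 (a.length : Int) 1) →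
    List.Pairwise (fun u v => PySem.List.pyGetD a u 0 ≤ PySem.List.pyGetD a v 0) s →
    (∀ x ∈ p, ∀ y ∈ s, PySem.List.pyGetD a x 0 < PySem.List.pyGetD a y 0) →
    ∀ popped, bLoop a s (p.foldl min (a.length : Int)) (p.foldl max (-1)) popped
      = popped + ((s.filter (Cb a)).length : Int) := by
  intro N
  induction N with
  | zero =>
    intro s hs p _ _ _ popped
    have : s = [] := List.length_eq_zero_iff.mp (by omega)
    subst this
    rw [bLoop_nil]
    simp
  | succ N ih =>
    intro s hs p hperm hpw hps popped
    cases s with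
    | nil => rw [bLoop_nil]; simp
    | cons i rest =>
      set pred := (fun j => PySem.List.pyGetD a j 0 == PySem.List.pyGetD a i 0) with hpred
      set grp := (i :: rest).takeWhile pred with hgrp
      set rest' := (i :: rest).dropWhile pred with hrest'
      have hsplit : grp ++ rest' = i :: rest := List.takeWhile_append_dropWhile
      -- keys in grp are all = key i; keys in rest' are all > key i
      have hgkey : ∀ x ∈ grp, PySem.List.pyGetD a x 0 = PySem.List.pyGetD a i 0 := by
        intro x hx
        have := List.mem_takeWhile_imp hx
        rwa [hpred, beq_iff_eq] at this
      have hmem_s : ∀ x ∈ grp, x ∈ i :: rest := by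
        intro x hx; rw [← hsplit]; exact List.mem_append.mpr (Or.inl hx)
      have hmem_s' : ∀ x ∈ rest', x ∈ i :: rest := by
        intro x hx; rw [← hsplit]; exact List.mem_append.mpr (Or.inr hx)
      have hge : ∀ x ∈ i :: rest, PySem.List.pyGetD a i 0 ≤ PySem.List.pyGetD a x 0 := by
        intro x hx
        rcases List.mem_cons.mp hx with rfl | hx'
        · exact le_refl _
        · exact (List.pairwise_cons.mp hpw).1 x hx'
      have hrkey : ∀ x ∈ rest', PySem.List.pyGetD a i 0 < PySem.List.pyGetD a x 0 :=
        pairwise_dropWhile_gt (fun j => PySem.List.pyGetD a j 0) (PySem.List.pyGetD a i 0)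
          (i :: rest) hpw hge
      -- every index in i::rest lies in [0, n)
      have hrange : ∀ x ∈ i :: rest, 0 ≤ x ∧ x < (a.length : Int) := by
        intro x hx
        have : x ∈ p ++ i :: rest := List.mem_append.mpr (Or.inr hx)
        exact (mem_pyRange_zero a.length x).mp (hperm.mem_iff.mp this)
      -- the filter condition on grp agrees with Cb
      have hcond : ∀ x ∈ grp,
          (!(decide (p.foldl min (a.length : Int) < x) && decide (x < p.foldl max (-1)))) = Cb a x := by
        intro x hx
        have hxs := hmem_s x hx
        have hxr := hrange x hxs
        have hxkey := hgkey x hx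
        have hdL : decide (p.foldl min (a.length : Int) < x) =
            decide (∃ j ∈ PySem.List.pyRange 0 (a.length : Int) 1, j < x ∧
              PySem.List.pyGetD a j 0 < PySem.List.pyGetD a x 0) := by
          rw [decide_eq_decide, foldl_min_lt]
          constructor
          · rintro (h | ⟨j, hj, hjx⟩)
            · omega
            · refine ⟨j, hperm.mem_iff.mp (List.mem_append.mpr (Or.inl hj)), hjx, ?_⟩
              exact hps j hj x hxs
          · rintro ⟨j, hjr, hjx, hjlt⟩
            right
            have hj' : j ∈ p ++ i :: rest := hperm.symm.mem_iff.mp hjr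
            rcases List.mem_append.mp hj' with hjp | hjs
            · exact ⟨j, hjp, hjx⟩
            · exfalso
              have := hge j hjs
              omega
        have hdR : decide (x < p.foldl max (-1)) =
            decide (∃ j ∈ PySem.List.pyRange 0 (a.length : Int) 1, x < j ∧
              PySem.List.pyGetD a j 0 < PySem.List.pyGetD a x 0) := by
          rw [decide_eq_decide, foldl_max_gt]
          constructor
          · rintro (h | ⟨j, hj, hjx⟩)
            · omega
            · refine ⟨j, hperm.mem_iff.mp (List.mem_append.mpr (Or.inl hj)), hjx, ?_⟩
              exact hps j hj x hxs
          · rintro ⟨j, hjr, hjx, hjlt⟩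
            right
            have hj' : j ∈ p ++ i :: rest := hperm.symm.mem_iff.mp hjr
            rcases List.mem_append.mp hj' with hjp | hjs
            · exact ⟨j, hjp, hjx⟩
            · exfalso
              have := hge j hjs
              omega
        rw [Cb, hdL, hdR]
      have hrecall := ih rest' (by
          have : rest'.length < (i :: rest).length := by
            rw [hrest', List.dropWhile_cons, hpred]
            simp only [beq_self_eq_true, if_pos]
            exact Nat.lt_succ_of_le (List.length_dropWhile_le _ _)
          omega)
        (p ++ grp)
        (by rw [List.append_assoc, hsplit]; exact hperm)
        (by rw [hrest']; exact hpw.sublist (List.dropWhile_sublist _))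
        (by
          intro x hx y hy
          rcases List.mem_append.mp hx with hxp | hxg
          · exact hps x hxp y (hmem_s' y hy)
          · rw [hgkey x hxg]; exact hrkey y hy)
      rw [bLoop_cons, ← hpred, ← hgrp, ← hrest']
      rw [show grp.foldl min (p.foldl min (a.length : Int)) = (p ++ grp).foldl min (a.length : Int) by
            rw [List.foldl_append],
          show grp.foldl max (p.foldl max (-1)) = (p ++ grp).foldl max (-1) by
            rw [List.foldl_append],
          hrecall]
      rw [List.filter_congr hcond]
      rw [show (i :: rest).filter (Cb a) = grp.filter (Cb a) ++ rest'.filter (Cb a) by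
            rw [← List.filter_append, hsplit]]
      rw [List.length_append]
      push_cast
      ring

-- sum of 0/1 indicators is the filter length
theorem sum_indicator (p : Nat → Bool) : ∀ (l : List Nat),
    ((l.map (fun i => if p i then (1 : Int) else 0)).sum) = ((l.filter p).length : Int) := by
  intro l
  induction l with
  | nil => simp
  | cons x t ih =>
    rw [List.map_cons, List.sum_cons, ih, List.filter_cons]
    by_cases h : p x
    · rw [if_pos h, if_pos h, List.length_cons]; push_cast; ring
    · rw [if_neg h, if_neg h]; simp

theorem B_eq_cnt (a : List Int) :
    solution_alt a = ((List.range a.length).map (fun i => if cnt a i then (1 : Int) else 0)).sum := by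
  unfold solution_alt
  dsimp only
  have hperm0 : (([] : List Int) ++ PySem.List.sorted (PySem.List.pyRange 0 (a.length : Int) 1)
      (fun i => PySem.List.pyGetD a i 0)).Perm (PySem.List.pyRange 0 (a.length : Int) 1) := by
    rw [List.nil_append]
    exact PySem.List.sorted_perm _ _ _
  have h := bLoop_inv a (PySem.List.sorted (PySem.List.pyRange 0 (a.length : Int) 1)
      (fun i => PySem.List.pyGetD a i 0)).length
    (PySem.List.sorted (PySem.List.pyRange 0 (a.length : Int) 1) (fun i => PySem.List.pyGetD a i 0))
    le_rfl [] hperm0 (PySem.List.sorted_pairwise _ _) (by intro x hx; cases hx) 0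
  simp only [List.foldl_nil] at h
  rw [h, zero_add]
  have hpf : ((PySem.List.sorted (PySem.List.pyRange 0 (a.length : Int) 1)
      (fun i => PySem.List.pyGetD a i 0)).filter (Cb a)).length =
      ((PySem.List.pyRange 0 (a.length : Int) 1).filter (Cb a)).length :=
    ((PySem.List.sorted_perm _ _ _).filter (Cb a)).length_eq
  rw [hpf, PySem.List.pyRange_zero_nat, List.filter_map, List.length_map]
  have hcg : (List.range a.length).filter ((Cb a) ∘ (fun k : Nat => (k : Int))) =
      (List.range a.length).filter (fun i => cnt a i) := by
    apply List.filter_congr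
    intro i hi
    rw [List.mem_range] at hi
    exact Cb_cast a i hi
  rw [hcg, sum_indicator (fun i => cnt a i) (List.range a.length)]

-- ===== VERDICT (by name: the statement is the Claim_ definition above) =====
theorem solution_spec : Claim_equal_solution := by
  unfold Claim_equal_solution
  intro a _
  unfold Spec_solution
  rw [A_eq_cnt, B_eq_cnt]
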